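-- pv_equiv track=rewrite | github.com/vinchinzu/euler | python/831.py | poly_pow_trunc
-- ===== SOURCE A (Python) =====
-- DEG = 5  # we only ever need coefficients up to x^5
--
-- def poly_mul_trunc(a: list[int], b: list[int], deg: int = DEG) -> list[int]:
--     """Multiply two polynomials and truncate to degree <= deg."""
--     res = [0] * (deg + 1)
--     for i, ai in enumerate(a):
--         if ai == 0:
--             continue
--         for j, bj in enumerate(b):
--             if bj == 0:
--                 continue
--             k = i + j
--             if k <= deg:
--                 res[k] += ai * bj
--     return res
--
-- def poly_pow_trunc(base: list[int], exp: int, deg: int = DEG) -> list[int]: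
--     """Compute (base(x) ** exp) truncated to degree <= deg."""
--     res = [0] * (deg + 1)
--     res[0] = 1
--     b = base[:]
--     e = exp
--     while e > 0:
--         if e & 1:
--             res = poly_mul_trunc(res, b, deg)
--         e >>= 1
--         if e:
--             b = poly_mul_trunc(b, b, deg)
--     return res
-- ===== SOURCE B (Python) =====
-- DEG = 5  # we only ever need coefficients up to x^5
--
-- def poly_mul_trunc(a, b, deg=DEG):
--     """Multiply two polynomials and truncate to degree <= deg."""
--     res = [0] * (deg + 1)
--     for i, ai in enumerate(a):
--         if ai == 0:
--             continue
--         for j, bj in enumerate(b):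
--             if bj == 0:
--                 continue
--             k = i + j
--             if k <= deg:
--                 res[k] += ai * bj
--     return res
--
-- def poly_pow_trunc(base, exp, deg=DEG):
--     """Compute (base(x) ** exp) truncated to degree <= deg,
--     by top-down recursive halving of the exponent (squares the
--     partial RESULT, where A iterates bottom-up squaring the base)."""
--     def go(e):
--         if e <= 0:
--             unit = [0] * (deg + 1)
--             unit[0] = 1
--             return unit
--         half = go(e >> 1)
--         sq = poly_mul_trunc(half, half, deg)
--         return poly_mul_trunc(sq, base, deg) if e % 2 == 1 else sq
--     return go(exp)
-- ===== Notes on version B (the rewrite author's own statement) =====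
-- stated objective: alternative
-- what changed: Replaces A's bottom-up iterative binary exponentiation (LSB-first loop with an accumulator and repeated squaring of the base) by a top-down recursion that halves the exponent and squares the partial result, multiplying by the base on odd exponents; poly_mul_trunc is kept.
import Mathlib
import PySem

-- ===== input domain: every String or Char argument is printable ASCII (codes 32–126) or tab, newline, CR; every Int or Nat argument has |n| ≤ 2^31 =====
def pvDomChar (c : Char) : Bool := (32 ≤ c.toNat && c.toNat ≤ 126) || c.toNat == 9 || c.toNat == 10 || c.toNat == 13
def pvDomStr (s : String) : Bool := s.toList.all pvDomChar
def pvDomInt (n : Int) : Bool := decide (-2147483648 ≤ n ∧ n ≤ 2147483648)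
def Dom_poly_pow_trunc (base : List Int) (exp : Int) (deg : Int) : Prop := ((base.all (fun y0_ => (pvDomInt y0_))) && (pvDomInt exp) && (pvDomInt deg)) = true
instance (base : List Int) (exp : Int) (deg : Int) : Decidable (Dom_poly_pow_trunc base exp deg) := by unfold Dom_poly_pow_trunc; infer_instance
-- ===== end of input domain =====

-- B replaces A's bottom-up iterative binary exponentiation (accumulator + squaring of the base)
-- by a top-down recursion that squares the partial result; same multiplication helper, same values.

-- ===== PORT A =====
-- poly_mul_trunc: literal port of the helper (nested enumerate loops, skip-zero, res[k] += ai*bj).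
-- res[k] is always in range when it is reached (0 ≤ k ≤ deg < len res), so pyGetD/pySetD are exact.
def poly_mul_trunc (a : List Int) (b : List Int) (deg : Int) : List Int :=
  (PySem.List.enumerate a 0).foldl (fun res p =>
    if p.2 = 0 then res
    else (PySem.List.enumerate b 0).foldl (fun res q =>
      if q.2 = 0 then res
      else
        let k := p.1 + q.1
        if k ≤ deg then PySem.List.pySetD res k (PySem.List.pyGetD res k 0 + p.2 * q.2) else res)
      res)
    (List.replicate (deg + 1).toNat 0)

-- the while-loop of A; 'e & 1 = 1' and 'e >> 1' are e % 2 = 1 and e / 2 (ediv), exact for e > 0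
def powA (deg : Int) (res : List Int) (b : List Int) (e : Int) : List Int :=
  if h : 0 < e then
    let res' := if e % 2 = 1 then poly_mul_trunc res b deg else res
    let e' := e / 2
    let b' := if e' ≠ 0 then poly_mul_trunc b b deg else b
    powA deg res' b' e'
  else res
termination_by e.toNat
decreasing_by omega

-- res = [0]*(deg+1); res[0] = 1 (raises IndexError when deg < 0: excluded by Pre_); b = base[:]
def poly_pow_trunc (base : List Int) (exp : Int) (deg : Int) : List Int :=
  powA deg (PySem.List.pySetD (List.replicate (deg + 1).toNat 0) 0 1) base exp

-- ===== PORT B =====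
-- the inner 'go' of Source B: recursion on e, halving; base case builds the unit polynomial
def powGo (base : List Int) (deg : Int) (e : Int) : List Int :=
  if h : e ≤ 0 then PySem.List.pySetD (List.replicate (deg + 1).toNat 0) 0 1
  else
    let half := powGo base deg (e / 2)
    let sq := poly_mul_trunc half half deg
    if e % 2 = 1 then poly_mul_trunc sq base deg else sq
termination_by e.toNat
decreasing_by omega

def poly_pow_trunc_alt (base : List Int) (exp : Int) (deg : Int) : List Int :=
  powGo base deg exp

-- ===== PRECONDITION & SPEC =====
-- Pre_ excludes deg < 0, where both Pythons raise IndexError on res[0] = 1 / unit[0] = 1.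
def Pre_poly_pow_trunc (base : List Int) (exp : Int) (deg : Int) : Prop := 0 ≤ deg
instance (base : List Int) (exp : Int) (deg : Int) : Decidable (Pre_poly_pow_trunc base exp deg) := by unfold Pre_poly_pow_trunc; infer_instance
def pvWitness_poly_pow_trunc : List Int × Int × Int := ([1, 2], 3, 5)

def Spec_poly_pow_trunc (base : List Int) (exp : Int) (deg : Int) (out : List Int) : Prop := out = poly_pow_trunc_alt base exp deg
instance (base : List Int) (exp : Int) (deg : Int) (out : List Int) : Decidable (Spec_poly_pow_trunc base exp deg out) := by unfold Spec_poly_pow_trunc; infer_instance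

-- ===== CLAIM (what is proved, stated in full; the proofs are below) =====
def Claim_equal_poly_pow_trunc : Prop := ∀ (base : List Int) (exp : Int) (deg : Int), Dom_poly_pow_trunc base exp deg → Pre_poly_pow_trunc base exp deg → Spec_poly_pow_trunc base exp deg (poly_pow_trunc base exp deg)

-- ===== LEMMAS AND PROOFS =====

-- coefficient semantics: a list denotes its coefficient function (0 beyond the end)
def cf (a : List Int) (k : ℕ) : Int := a.getD k 0
-- convolution (the k-th coefficient of the product of two coefficient streams)
def conv (f g : ℕ → Int) (k : ℕ) : Int := ∑ i ∈ Finset.range (k + 1), f i * g (k - i)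
-- truncation to degree ≤ deg
def trunc (deg : Int) (f : ℕ → Int) (k : ℕ) : Int := if (k : Int) ≤ deg then f k else 0
-- truncated product
def tmul (deg : Int) (f g : ℕ → Int) : ℕ → Int := trunc deg (conv f g)
-- the list of coefficients 0..deg
def toL (deg : Int) (f : ℕ → Int) : List Int := (List.range (deg + 1).toNat).map f
def oneF : ℕ → Int := fun k => if k = 0 then 1 else 0
-- truncated powers (left-nested)
def pw (deg : Int) (β : ℕ → Int) : ℕ → (ℕ → Int)
  | 0 => oneF
  | n + 1 => tmul deg (pw deg β n) β

-- ---- convolution is a power-series product ----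
lemma conv_eq_coeff (f g : ℕ → Int) (k : ℕ) :
    conv f g k = PowerSeries.coeff k (PowerSeries.mk f * PowerSeries.mk g) := by
  rw [PowerSeries.coeff_mul, Finset.Nat.sum_antidiagonal_eq_sum_range_succ_mk]
  simp [conv, PowerSeries.coeff_mk]

lemma mk_conv (f g : ℕ → Int) :
    PowerSeries.mk (conv f g) = PowerSeries.mk f * PowerSeries.mk g := by
  apply PowerSeries.ext; intro n
  rw [PowerSeries.coeff_mk, conv_eq_coeff]

lemma conv_assoc (f g h : ℕ → Int) : conv (conv f g) h = conv f (conv g h) := by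
  funext k
  rw [conv_eq_coeff, conv_eq_coeff, mk_conv, mk_conv, mul_assoc]

lemma conv_congr {f f' g g' : ℕ → Int} (k : ℕ)
    (hf : ∀ i ≤ k, f i = f' i) (hg : ∀ i ≤ k, g i = g' i) : conv f g k = conv f' g' k := by
  unfold conv
  refine Finset.sum_congr rfl (fun i hi => ?_)
  simp only [Finset.mem_range] at hi
  rw [hf i (by omega), hg (k - i) (by omega)]

lemma conv_one (f : ℕ → Int) (k : ℕ) : conv f oneF k = f k := by
  unfold conv
  rw [Finset.sum_eq_single_of_mem k (by simp)]
  · simp [oneF]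
  · intro i hi hne
    simp only [Finset.mem_range] at hi
    simp [oneF]; omega

lemma one_conv (f : ℕ → Int) (k : ℕ) : conv oneF f k = f k := by
  unfold conv
  rw [Finset.sum_eq_single_of_mem 0 (by simp)]
  · simp [oneF]
  · intro i hi hne
    simp [oneF, hne]

-- ---- tmul algebra ----
lemma trunc_trunc (deg : Int) (f : ℕ → Int) : trunc deg (trunc deg f) = trunc deg f := by
  funext k; simp [trunc]; intro h; simp [h]

lemma tmul_trunc_right (deg : Int) (f g : ℕ → Int) : tmul deg f (trunc deg g) = tmul deg f g := by
  funext k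
  unfold tmul trunc
  split_ifs with h
  · exact conv_congr k (fun _ _ => rfl) (fun i hi => by rw [if_pos (by omega)])
  · rfl

lemma trunc_smul (deg : Int) (f g : ℕ → Int) : trunc deg (tmul deg f g) = tmul deg f g := by
  simp [tmul, trunc_trunc]

lemma tmul_assoc (deg : Int) (f g h : ℕ → Int) :
    tmul deg (tmul deg f g) h = tmul deg f (tmul deg g h) := by
  have l : tmul deg (tmul deg f g) h = trunc deg (conv (conv f g) h) := by
    unfold tmul
    funext k; unfold trunc
    split_ifs with hk
    · exact conv_congr k (fun i hi => by rw [if_pos (by omega)])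
        (fun _ _ => rfl)
    · rfl
  have r : tmul deg f (tmul deg g h) = trunc deg (conv f (conv g h)) := by
    unfold tmul
    funext k; unfold trunc
    split_ifs with hk
    · exact conv_congr k (fun _ _ => rfl)
        (fun i hi => by rw [if_pos (by omega)])
    · rfl
  rw [l, r, conv_assoc]

lemma trunc_one (deg : Int) (hdeg : 0 ≤ deg) : trunc deg oneF = oneF := by
  funext k; simp [trunc, oneF]; intro h; omega

lemma tmul_one (deg : Int) (f : ℕ → Int) : tmul deg f oneF = trunc deg f := by
  funext k; simp [tmul, trunc, conv_one]

lemma one_smul' (deg : Int) (f : ℕ → Int) : tmul deg oneF f = trunc deg f := by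
  funext k; simp [tmul, trunc, one_conv]

lemma pw_trunc (deg : Int) (hdeg : 0 ≤ deg) (β : ℕ → Int) (n : ℕ) :
    trunc deg (pw deg β n) = pw deg β n := by
  cases n with
  | zero => exact trunc_one deg hdeg
  | succ m => simp [pw, trunc_smul]

lemma pw_succ_left (deg : Int) (hdeg : 0 ≤ deg) (β : ℕ → Int) (n : ℕ) :
    tmul deg β (pw deg β n) = pw deg β (n + 1) := by
  induction n with
  | zero => simp [pw, tmul_one, one_smul']
  | succ m ih =>
      calc tmul deg β (pw deg β (m + 1))
          = tmul deg (tmul deg β (pw deg β m)) β := (tmul_assoc deg β (pw deg β m) β).symm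
        _ = tmul deg (pw deg β (m + 1)) β := by rw [ih]
        _ = pw deg β (m + 1 + 1) := by conv_rhs => rw [pw]

lemma pw_sq (deg : Int) (hdeg : 0 ≤ deg) (β : ℕ → Int) (m : ℕ) :
    pw deg (tmul deg β β) m = pw deg β (2 * m) := by
  induction m with
  | zero => rfl
  | succ m ih =>
      rw [show 2 * (m + 1) = 2 * m + 1 + 1 from by ring]
      calc pw deg (tmul deg β β) (m + 1)
          = tmul deg (pw deg β (2 * m)) (tmul deg β β) := by rw [pw, ih]
        _ = tmul deg (tmul deg (pw deg β (2 * m)) β) β :=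
            (tmul_assoc deg (pw deg β (2 * m)) β β).symm
        _ = pw deg β (2 * m + 1 + 1) := by conv_rhs => rw [pw, pw]

-- ---- toL / cf bridge ----
lemma length_toL (deg : Int) (f : ℕ → Int) : (toL deg f).length = (deg + 1).toNat := by
  simp [toL]

lemma cf_toL (deg : Int) (hdeg : 0 ≤ deg) (f : ℕ → Int) : cf (toL deg f) = trunc deg f := by
  funext k
  unfold cf toL trunc
  by_cases h : (k : Int) ≤ deg
  · rw [if_pos h, List.getD_eq_getElem?_getD, List.getElem?_map,
      List.getElem?_range (by omega), Option.map_some, Option.getD_some]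
  · rw [if_neg h, List.getD_eq_getElem?_getD, List.getElem?_map,
      List.getElem?_eq_none (by simp; omega), Option.map_none, Option.getD_none]

-- ---- characterization of poly_mul_trunc ----
lemma getD_set' (l : List Int) (n : ℕ) (v : Int) (k : ℕ) :
    (l.set n v).getD k 0 = if k = n ∧ n < l.length then v else l.getD k 0 := by
  rcases Nat.lt_or_ge k l.length with hk | hk
  · rw [List.getD_eq_getElem _ 0 (by simpa using hk), List.getElem_set,
      List.getD_eq_getElem _ 0 hk]
    split_ifs with h1 h2 h2 <;> first | rfl | omega
  · rw [List.getD_eq_default _ 0 (by simpa using hk), List.getD_eq_default _ 0 hk,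
      if_neg (by omega)]

lemma cf_cons_zero (x : Int) (b : List Int) : cf (x :: b) 0 = x := rfl
lemma cf_cons_succ (x : Int) (b : List Int) (n : ℕ) : cf (x :: b) (n + 1) = cf b n := rfl
lemma cf_nil (n : ℕ) : cf [] n = 0 := rfl

-- the two loop bodies of poly_mul_trunc, named for the induction
def istep (deg i ai : Int) (res : List Int) (q : Int × Int) : List Int :=
  if q.2 = 0 then res
  else
    let k := i + q.1
    if k ≤ deg then PySem.List.pySetD res k (PySem.List.pyGetD res k 0 + ai * q.2) else res

def ostep (deg : Int) (b : List Int) (res : List Int) (p : Int × Int) : List Int :=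
  if p.2 = 0 then res else (PySem.List.enumerate b 0).foldl (istep deg p.1 p.2) res

-- the inner loop adds ai * bj to coefficient i + j (when i + j ≤ deg)
lemma inner_eq (deg : Int) (i ai : Int) (hi : 0 ≤ i) :
    ∀ (b : List Int) (s : Int), 0 ≤ s → ∀ (res : List Int), res.length = (deg + 1).toNat →
      ((PySem.List.enumerate b s).foldl (istep deg i ai) res).length = (deg + 1).toNat ∧
      ∀ k : ℕ,
        ((PySem.List.enumerate b s).foldl (istep deg i ai) res).getD k 0
        = res.getD k 0 +
          ((PySem.List.enumerate b s).map (fun q =>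
            if i + q.1 = (k : Int) ∧ (k : Int) ≤ deg then ai * q.2 else 0)).sum := by
  intro b
  induction b with
  | nil => intro s hs res hres; simp [PySem.List.enumerate_nil, hres]
  | cons x b ih =>
      intro s hs res hres
      rw [PySem.List.enumerate_cons]
      simp only [List.foldl_cons, List.map_cons, List.sum_cons]
      by_cases hx : x = 0
      · subst hx
        rw [show istep deg i ai res (s, 0) = res from by simp [istep]]
        obtain ⟨hl, hv⟩ := ih (s + 1) (by omega) res hres
        refine ⟨hl, fun k => ?_⟩
        rw [hv k]
        have : (if i + s = (k : Int) ∧ (k : Int) ≤ deg then ai * 0 else 0) = 0 := by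
          split_ifs <;> ring
        rw [this]; ring
      · by_cases hk : i + s ≤ deg
        · rw [show istep deg i ai res (s, x)
              = PySem.List.pySetD res (i + s) (PySem.List.pyGetD res (i + s) 0 + ai * x) from by
            simp [istep, hx, hk]]
          set res1 := PySem.List.pySetD res (i + s) (PySem.List.pyGetD res (i + s) 0 + ai * x)
            with hres1
          have hlen1 : res1.length = (deg + 1).toNat := by
            rw [hres1, PySem.List.pySetD_of_nonneg _ _ (by omega), List.length_set, hres]
          obtain ⟨hl, hv⟩ := ih (s + 1) (by omega) res1 hlen1
          refine ⟨hl, fun k => ?_⟩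
          rw [hv k]
          have hval : res1.getD k 0
              = res.getD k 0 + (if i + s = (k : Int) ∧ (k : Int) ≤ deg then ai * x else 0) := by
            rw [hres1, PySem.List.pySetD_of_nonneg _ _ (by omega), getD_set']
            have hrange : (i + s).toNat < res.length := by rw [hres]; omega
            by_cases hks : k = (i + s).toNat
            · rw [if_pos ⟨hks, hrange⟩, if_pos (by omega),
                PySem.List.pyGetD_of_nonneg _ _ (by omega)]
              subst hks; ring
            · rw [if_neg (by tauto), if_neg (by omega)]; ring
          rw [hval]; ring
        · rw [show istep deg i ai res (s, x) = res from by simp [istep, hx, hk]]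
          obtain ⟨hl, hv⟩ := ih (s + 1) (by omega) res hres
          refine ⟨hl, fun k => ?_⟩
          rw [hv k, if_neg (by omega)]; ring

-- closed form of the inner-loop contribution
lemma enum_pick (deg : Int) (i ai : Int) (k : ℕ) (hk : (k : Int) ≤ deg) :
    ∀ (b : List Int) (s : Int), 0 ≤ s →
      ((PySem.List.enumerate b s).map (fun q =>
        if i + q.1 = (k : Int) ∧ (k : Int) ≤ deg then ai * q.2 else 0)).sum
      = if i ≤ (k : Int) ∧ s ≤ (k : Int) - i then ai * cf b ((k : Int) - i - s).toNat else 0 := by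
  intro b
  induction b with
  | nil =>
      intro s hs
      rw [PySem.List.enumerate_nil]
      simp only [List.map_nil, List.sum_nil, cf_nil]
      split_ifs <;> ring
  | cons x b ih =>
      intro s hs
      rw [PySem.List.enumerate_cons]
      simp only [List.map_cons, List.sum_cons]
      rw [ih (s + 1) (by omega)]
      by_cases h1 : i + s = (k : Int)
      · rw [if_pos ⟨h1, hk⟩, if_neg (by omega),
          if_pos ⟨by omega, by omega⟩, show ((k : Int) - i - s).toNat = 0 from by omega,
          cf_cons_zero]
        ring
      · rw [if_neg (by tauto)]
        by_cases h2 : i ≤ (k : Int) ∧ s + 1 ≤ (k : Int) - i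
        · rw [if_pos h2, if_pos ⟨h2.1, by omega⟩,
            show ((k : Int) - i - s).toNat = ((k : Int) - i - (s + 1)).toNat + 1 from by omega,
            cf_cons_succ]
          ring
        · rw [if_neg h2, if_neg (by omega)]; ring

-- the outer-loop contribution is the convolution
lemma enum_outer (b : List Int) (k : ℕ) :
    ∀ (a : List Int) (s : ℕ),
      ((PySem.List.enumerate a (s : Int)).map (fun p =>
        if p.1 ≤ (k : Int) ∧ 0 ≤ (k : Int) - p.1 then p.2 * cf b ((k : Int) - p.1 - 0).toNat
        else 0)).sum
      = ∑ i ∈ Finset.Ico s (k + 1), cf a (i - s) * cf b (k - i) := by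
  intro a
  induction a with
  | nil =>
      intro s
      rw [PySem.List.enumerate_nil]
      simp only [List.map_nil, List.sum_nil]
      exact (Finset.sum_eq_zero (fun i _ => by simp [cf_nil])).symm
  | cons y a ih =>
      intro s
      rw [PySem.List.enumerate_cons,
        show ((s : Int) + 1) = ((s + 1 : ℕ) : Int) from by push_cast; ring]
      simp only [List.map_cons, List.sum_cons]
      rw [ih (s + 1)]
      by_cases hs : s ≤ k
      · rw [if_pos ⟨by omega, by omega⟩,
          Finset.sum_eq_sum_Ico_succ_bot (show s < k + 1 from by omega)]
        congr 1
        · rw [show ((k : Int) - s - 0).toNat = k - s from by omega]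
          simp [cf_cons_zero]
        · refine Finset.sum_congr rfl (fun i hi => ?_)
          simp only [Finset.mem_Ico] at hi
          rw [show i - s = (i - (s + 1)) + 1 from by omega, cf_cons_succ]
      · rw [if_neg (by omega), Finset.Ico_eq_empty (by omega), Finset.Ico_eq_empty (by omega)]
        simp

lemma outer_eq (deg : Int) (b : List Int) :
    ∀ (a' : List Int) (s : Int), 0 ≤ s → ∀ (res : List Int), res.length = (deg + 1).toNat →
      ((PySem.List.enumerate a' s).foldl (ostep deg b) res).length = (deg + 1).toNat ∧
      ∀ k : ℕ, (k : Int) ≤ deg →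
        ((PySem.List.enumerate a' s).foldl (ostep deg b) res).getD k 0
        = res.getD k 0 +
          ((PySem.List.enumerate a' s).map (fun p =>
            if p.1 ≤ (k : Int) ∧ 0 ≤ (k : Int) - p.1 then p.2 * cf b ((k : Int) - p.1 - 0).toNat
            else 0)).sum := by
  intro a'
  induction a' with
  | nil => intro s hs res hres; simp [PySem.List.enumerate_nil, hres]
  | cons y a' ih =>
      intro s hs res hres
      rw [PySem.List.enumerate_cons]
      simp only [List.foldl_cons, List.map_cons, List.sum_cons]
      by_cases hy : y = 0
      · subst hy
        rw [show ostep deg b res (s, 0) = res from by simp [ostep]]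
        obtain ⟨hl, hv⟩ := ih (s + 1) (by omega) res hres
        refine ⟨hl, fun k hk => ?_⟩
        rw [hv k hk]
        have : (if (s : Int) ≤ (k : Int) ∧ 0 ≤ (k : Int) - s
            then (0 : Int) * cf b ((k : Int) - s - 0).toNat else 0) = 0 := by
          split_ifs <;> ring
        rw [this]; ring
      · rw [show ostep deg b res (s, y)
            = (PySem.List.enumerate b 0).foldl (istep deg s y) res from by simp [ostep, hy]]
        obtain ⟨hlen1, hval1⟩ := inner_eq deg s y hs b 0 le_rfl res hres
        obtain ⟨hl, hv⟩ := ih (s + 1) (by omega) _ hlen1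
        refine ⟨hl, fun k hk => ?_⟩
        rw [hv k hk, hval1 k, enum_pick deg s y k hk b 0 le_rfl]
        ring

lemma mul_eq (deg : Int) (hdeg : 0 ≤ deg) (a b : List Int) :
    poly_mul_trunc a b deg = toL deg (tmul deg (cf a) (cf b)) := by
  have hrepr : poly_mul_trunc a b deg
      = (PySem.List.enumerate a 0).foldl (ostep deg b) (List.replicate (deg + 1).toNat 0) := rfl
  rw [hrepr]
  obtain ⟨hlen, hval⟩ := outer_eq deg b a 0 le_rfl (List.replicate (deg + 1).toNat 0)
    (List.length_replicate)
  apply List.ext_getElem (by rw [hlen, length_toL])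
  intro n h1 h2
  have hn : (n : Int) ≤ deg := by
    have := h2; rw [length_toL] at this; omega
  rw [← List.getD_eq_getElem _ 0 h1, hval n hn]
  have hz : (List.replicate (deg + 1).toNat (0 : Int)).getD n 0 = 0 := by
    rcases Nat.lt_or_ge n (deg + 1).toNat with h | h
    · rw [List.getD_eq_getElem _ 0 (by simpa using h), List.getElem_replicate]
    · rw [List.getD_eq_default _ 0 (by simpa using h)]
  rw [hz]
  have eo := enum_outer b n a 0
  simp only [Nat.cast_zero] at eo
  rw [eo]
  unfold toL
  rw [List.getElem_map, List.getElem_range]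
  have ht : tmul deg (cf a) (cf b) n = conv (cf a) (cf b) n := by
    unfold tmul trunc; rw [if_pos hn]
  rw [ht]
  unfold conv
  rw [← Finset.range_eq_Ico]
  simp

-- the unit list [1,0,…,0]
lemma pw_add (deg : Int) (hdeg : 0 ≤ deg) (β : ℕ → Int) (m n : ℕ) :
    pw deg β (m + n) = tmul deg (pw deg β m) (pw deg β n) := by
  induction n with
  | zero => rw [Nat.add_zero, show pw deg β 0 = oneF from rfl, tmul_one, pw_trunc deg hdeg]
  | succ n ih =>
      rw [show m + (n + 1) = (m + n) + 1 from by ring, pw, ih, tmul_assoc]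
      conv_rhs => rw [pw]

lemma one_list_eq (deg : Int) (hdeg : 0 ≤ deg) :
    PySem.List.pySetD (List.replicate (deg + 1).toNat 0) 0 1 = toL deg oneF := by
  rw [PySem.List.pySetD_of_nonneg _ _ (by omega)]
  apply List.ext_getElem (by simp [toL])
  intro i h1 h2
  rw [List.getElem_set]
  unfold toL
  rw [List.getElem_map, List.getElem_range]
  unfold oneF
  rcases Nat.eq_zero_or_pos i with hi | hi
  · subst hi; simp
  · rw [if_neg (by omega), if_neg (by omega), List.getElem_replicate]

-- ---- the two loops ----
lemma powGo_eq (deg : Int) (hdeg : 0 ≤ deg) (base : List Int) :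
    ∀ (n : ℕ) (e : Int), e.toNat = n → powGo base deg e = toL deg (pw deg (cf base) n) := by
  intro n
  induction n using Nat.strong_induction_on with
  | _ n ih =>
      intro e he
      by_cases h : e ≤ 0
      · rw [show powGo base deg e = PySem.List.pySetD (List.replicate (deg + 1).toNat 0) 0 1 from
            by rw [powGo, dif_pos h],
          show n = 0 from by omega, show pw deg (cf base) 0 = oneF from rfl]
        exact one_list_eq deg hdeg
      · have hstep : powGo base deg e
            = (if e % 2 = 1 then
                poly_mul_trunc
                  (poly_mul_trunc (powGo base deg (e / 2)) (powGo base deg (e / 2)) deg)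
                  base deg
              else poly_mul_trunc (powGo base deg (e / 2)) (powGo base deg (e / 2)) deg) := by
          rw [powGo, dif_neg h]
        rw [hstep]
        have hn : 0 < n := by omega
        have he2 : (e / 2).toNat = n / 2 := by omega
        rw [ih (n / 2) (by omega) (e / 2) he2]
        have hsq : poly_mul_trunc (toL deg (pw deg (cf base) (n / 2)))
              (toL deg (pw deg (cf base) (n / 2))) deg
            = toL deg (pw deg (cf base) (n / 2 + n / 2)) := by
          rw [mul_eq deg hdeg, cf_toL deg hdeg, pw_trunc deg hdeg,
            ← pw_add deg hdeg (cf base) (n / 2) (n / 2)]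
        rw [hsq]
        by_cases hpar : e % 2 = 1
        · rw [if_pos hpar, mul_eq deg hdeg, cf_toL deg hdeg, pw_trunc deg hdeg]
          conv_rhs => rw [show n = (n / 2 + n / 2) + 1 from by omega, pw]
        · rw [if_neg hpar, show n / 2 + n / 2 = n from by omega]

lemma powA_eq (deg : Int) (hdeg : 0 ≤ deg) :
    ∀ (n : ℕ) (e : Int), e.toNat = n → ∀ (r : ℕ → Int) (b : List Int), trunc deg r = r →
      powA deg (toL deg r) b e = toL deg (tmul deg r (pw deg (cf b) n)) := by
  intro n
  induction n using Nat.strong_induction_on with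
  | _ n ih =>
      intro e he r b hr
      by_cases h : 0 < e
      · have hstep : powA deg (toL deg r) b e
            = powA deg (if e % 2 = 1 then poly_mul_trunc (toL deg r) b deg else toL deg r)
                (if e / 2 ≠ 0 then poly_mul_trunc b b deg else b) (e / 2) := by
          rw [powA, dif_pos h]
        rw [hstep]
        have hres' : (if e % 2 = 1 then poly_mul_trunc (toL deg r) b deg else toL deg r)
            = toL deg (if e % 2 = 1 then tmul deg r (cf b) else r) := by
          split_ifs with hpar
          · rw [mul_eq deg hdeg, cf_toL deg hdeg, hr]
          · rfl
        have hr' : trunc deg (if e % 2 = 1 then tmul deg r (cf b) else r)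
            = (if e % 2 = 1 then tmul deg r (cf b) else r) := by
          split_ifs with hpar
          · exact trunc_smul deg r (cf b)
          · exact hr
        by_cases h2 : e / 2 ≠ 0
        · have h2' : 0 < e / 2 := by omega
          rw [hres', if_pos h2,
            ih (e / 2).toNat (by omega) (e / 2) rfl _ (poly_mul_trunc b b deg) hr',
            mul_eq deg hdeg, cf_toL deg hdeg, trunc_smul, pw_sq deg hdeg]
          by_cases hpar : e % 2 = 1
          · rw [if_pos hpar, tmul_assoc, pw_succ_left deg hdeg,
              show 2 * (e / 2).toNat + 1 = n from by omega]
          · rw [if_neg hpar, show 2 * (e / 2).toNat = n from by omega]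
        · have he1 : e = 1 := by omega
          have hn1 : n = 1 := by omega
          rw [hres', if_neg h2, ih (e / 2).toNat (by omega) (e / 2) rfl _ b hr',
            show (e / 2).toNat = 0 from by omega, show pw deg (cf b) 0 = oneF from rfl,
            tmul_one, hr', hn1,
            show pw deg (cf b) 1 = trunc deg (cf b) from by rw [pw]; exact one_smul' deg (cf b),
            tmul_trunc_right, if_pos (by omega : e % 2 = 1)]
      · rw [show powA deg (toL deg r) b e = toL deg r from by rw [powA, dif_neg h],
          show n = 0 from by omega, show pw deg (cf b) 0 = oneF from rfl, tmul_one, hr]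

-- ===== VERDICT (by name: the statement is the Claim_ definition above) =====
theorem poly_pow_trunc_spec : Claim_equal_poly_pow_trunc := by
  intro base exp deg _ hpre
  unfold Spec_poly_pow_trunc poly_pow_trunc poly_pow_trunc_alt
  rw [one_list_eq deg hpre, powA_eq deg hpre exp.toNat exp rfl oneF base (trunc_one deg hpre),
      powGo_eq deg hpre base exp.toNat exp rfl, one_smul' deg, pw_trunc deg hpre]
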